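-- pv_equiv track=rewrite | github.com/ansuman-shukla/AI-First-Internal-Helpdesk-Portal- | backend/app/services/ai/response_suggestion_rag.py | _extract_department_hints
-- ===== SOURCE A (Python) =====
-- from typing import List, Optional
--
-- def _extract_department_hints(keywords: List[str]) -> List[str]:
--     """Extract department-related hints from conversation keywords."""
--     it_keywords = {
--         "computer", "laptop", "software", "hardware", "network", "internet",
--         "email", "password", "login", "system", "server", "database",
--         "application", "app", "website", "wifi", "printer", "monitor",
--         "technical", "bug", "error", "crash", "install", "update"
--     }
--
--     hr_keywords = {
--         "payroll", "salary", "benefits", "vacation", "leave", "holiday",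
--         "policy", "harassment", "training", "onboarding", "performance",
--         "review", "promotion", "employee", "manager", "workplace"
--     }
--
--     hints = []
--     if any(keyword in it_keywords for keyword in keywords):
--         hints.append("IT")
--     if any(keyword in hr_keywords for keyword in keywords):
--         hints.append("HR")
--
--     return hints
-- ===== SOURCE B (Python) =====
-- def _extract_department_hints(keywords):
--     """Extract department-related hints from conversation keywords."""
--     it_keywords = {
--         "computer", "laptop", "software", "hardware", "network", "internet",
--         "email", "password", "login", "system", "server", "database",
--         "application", "app", "website", "wifi", "printer", "monitor",
--         "technical", "bug", "error", "crash", "install", "update"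
--     }
--     hr_keywords = {
--         "payroll", "salary", "benefits", "vacation", "leave", "holiday",
--         "policy", "harassment", "training", "onboarding", "performance",
--         "review", "promotion", "employee", "manager", "workplace"
--     }
--     it_found = False
--     hr_found = False
--     for keyword in keywords:
--         it_found = it_found or keyword in it_keywords
--         hr_found = hr_found or keyword in hr_keywords
--         if it_found and hr_found:
--             break
--     hints = []
--     if it_found:
--         hints.append("IT")
--     if hr_found:
--         hints.append("HR")
--     return hints
-- ===== Notes on version B (the rewrite author's own statement) =====
-- stated objective: alternative
-- what changed: Replaces A's two separate any() scans over the keyword list by a single loop maintaining it_found/hr_found flags with an early break once both are set, then builds the hints list from the flags.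
import Mathlib
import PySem

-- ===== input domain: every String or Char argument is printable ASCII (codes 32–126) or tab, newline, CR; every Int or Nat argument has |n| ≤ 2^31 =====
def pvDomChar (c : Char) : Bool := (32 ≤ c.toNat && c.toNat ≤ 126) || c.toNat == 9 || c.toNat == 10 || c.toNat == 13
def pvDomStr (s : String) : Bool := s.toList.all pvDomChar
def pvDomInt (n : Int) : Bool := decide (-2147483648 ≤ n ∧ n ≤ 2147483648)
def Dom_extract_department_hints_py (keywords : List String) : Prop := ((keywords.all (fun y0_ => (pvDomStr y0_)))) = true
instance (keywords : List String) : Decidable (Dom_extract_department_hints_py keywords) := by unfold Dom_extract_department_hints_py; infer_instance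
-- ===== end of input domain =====

-- B replaces A's two any() scans by one loop with two flags and an early break; objective: alternative decomposition, same cost.

-- ===== PORT A =====
-- the IT keyword set (a Python set literal of distinct strings)
def itKeywords : PySem.Set String := PySem.Set.ofList
  ["computer", "laptop", "software", "hardware", "network", "internet",
   "email", "password", "login", "system", "server", "database",
   "application", "app", "website", "wifi", "printer", "monitor",
   "technical", "bug", "error", "crash", "install", "update"]

-- the HR keyword set
def hrKeywords : PySem.Set String := PySem.Set.ofList
  ["payroll", "salary", "benefits", "vacation", "leave", "holiday",
   "policy", "harassment", "training", "onboarding", "performance",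
   "review", "promotion", "employee", "manager", "workplace"]

def extract_department_hints_py (keywords : List String) : List String :=
  let hints : List String := []
  let hints := if keywords.any (fun k => itKeywords.contains k) then hints ++ ["IT"] else hints
  let hints := if keywords.any (fun k => hrKeywords.contains k) then hints ++ ["HR"] else hints
  hints

-- ===== PORT B =====
-- B's single loop: carries (it_found, hr_found), breaking early once both are true
def hintLoop : List String → Bool → Bool → Bool × Bool
  | [], itf, hrf => (itf, hrf)
  | k :: rest, itf, hrf =>
    let itf := itf || itKeywords.contains k
    let hrf := hrf || hrKeywords.contains k
    if itf && hrf then (itf, hrf) else hintLoop rest itf hrf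

def extract_department_hints_py_alt (keywords : List String) : List String :=
  let (itf, hrf) := hintLoop keywords false false
  (if itf then ["IT"] else []) ++ (if hrf then ["HR"] else [])

-- ===== PRECONDITION & SPEC =====
def Spec_extract_department_hints_py (keywords : List String) (out : List String) : Prop := out = extract_department_hints_py_alt keywords
instance (keywords : List String) (out : List String) : Decidable (Spec_extract_department_hints_py keywords out) := by unfold Spec_extract_department_hints_py; infer_instance

-- ===== CLAIM (what is proved, stated in full; the proofs are below) =====
def Claim_equal_extract_department_hints_py : Prop := ∀ (keywords : List String), Dom_extract_department_hints_py keywords → Spec_extract_department_hints_py keywords (extract_department_hints_py keywords)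

-- ===== LEMMAS AND PROOFS =====
theorem hintLoop_eq (ks : List String) : ∀ itf hrf,
    hintLoop ks itf hrf
      = (itf || ks.any (fun k => itKeywords.contains k),
         hrf || ks.any (fun k => hrKeywords.contains k)) := by
  induction ks with
  | nil => intro itf hrf; simp [hintLoop]
  | cons k rest ih =>
    intro itf hrf
    simp only [hintLoop, List.any_cons]
    split
    · rename_i h
      simp only [Bool.and_eq_true] at h
      refine Prod.ext ?_ ?_ <;> simp only [← Bool.or_assoc, h.1, h.2, Bool.true_or]
    · rw [ih]; simp [Bool.or_assoc]

-- ===== VERDICT (by name: the statement is the Claim_ definition above) =====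
theorem extract_department_hints_py_spec : Claim_equal_extract_department_hints_py := by
  intro keywords _
  unfold Spec_extract_department_hints_py extract_department_hints_py extract_department_hints_py_alt
  rw [hintLoop_eq]
  cases h1 : keywords.any (fun k => itKeywords.contains k) <;>
    cases h2 : keywords.any (fun k => hrKeywords.contains k) <;>
      (simp only [h1, h2]; decide)
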